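-- pv_equiv track=rewrite | github.com/kylecaswell/bustimes.org | vehicles/models.py | get_css
-- ===== SOURCE A (Python) =====
-- from math import ceil
--
-- def get_css(colours, direction=None, horizontal=False, angle=None):
--     if len(colours) == 1:
--         return colours[0]
--     if direction is None:
--         direction = 180
--     else:
--         direction = int(direction)
--     background = 'linear-gradient('
--     if horizontal:
--         background += 'to top'
--     elif direction < 180:
--         if angle:
--             background += f'{360-angle}deg'
--         else:
--             background += 'to left'
--     elif angle:
--         background += f'{angle}deg'
--     else:
--         background += 'to right'
--     percentage = 100 / len(colours)
--     for i, colour in enumerate(colours):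
--         if i != 0 and colour != colours[i - 1]:
--             background += ',{} {}%'.format(colour, ceil(percentage * i))
--         if i != len(colours) - 1 and colour != colours[i + 1]:
--             background += ',{} {}%'.format(colour, ceil(percentage * (i + 1)))
--     background += ')'
--
--     return background
-- ===== SOURCE B (Python) =====
-- from math import ceil
-- from itertools import groupby
--
--
-- def get_css(colours, direction=None, horizontal=False, angle=None):
--     if len(colours) == 1:
--         return colours[0]
--     d = 180 if direction is None else int(direction)
--     if horizontal:
--         prefix = 'to top'
--     elif d < 180:
--         prefix = f'{360 - angle}deg' if angle else 'to left'
--     else: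
--         prefix = f'{angle}deg' if angle else 'to right'
--     n = len(colours)
--     pct = 100 / n
--     parts = ['linear-gradient(', prefix]
--     pos = 0
--     for colour, grp in groupby(colours):
--         length = sum(1 for _ in grp)
--         start, end = pos, pos + length - 1
--         if start != 0:
--             parts.append(f',{colour} {ceil(pct * start)}%')
--         if end != n - 1:
--             parts.append(f',{colour} {ceil(pct * (end + 1))}%')
--         pos += length
--     parts.append(')')
--     return ''.join(parts)
-- ===== Notes on version B (the rewrite author's own statement) =====
-- stated objective: alternative
-- what changed: B groups the colours into runs of consecutive equal values with itertools.groupby and emits both gradient stops of each run at once into a parts list joined at the end, instead of A's element-by-element loop with neighbour comparisons colours[i-1]/colours[i+1] and string concatenation.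
import Mathlib
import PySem

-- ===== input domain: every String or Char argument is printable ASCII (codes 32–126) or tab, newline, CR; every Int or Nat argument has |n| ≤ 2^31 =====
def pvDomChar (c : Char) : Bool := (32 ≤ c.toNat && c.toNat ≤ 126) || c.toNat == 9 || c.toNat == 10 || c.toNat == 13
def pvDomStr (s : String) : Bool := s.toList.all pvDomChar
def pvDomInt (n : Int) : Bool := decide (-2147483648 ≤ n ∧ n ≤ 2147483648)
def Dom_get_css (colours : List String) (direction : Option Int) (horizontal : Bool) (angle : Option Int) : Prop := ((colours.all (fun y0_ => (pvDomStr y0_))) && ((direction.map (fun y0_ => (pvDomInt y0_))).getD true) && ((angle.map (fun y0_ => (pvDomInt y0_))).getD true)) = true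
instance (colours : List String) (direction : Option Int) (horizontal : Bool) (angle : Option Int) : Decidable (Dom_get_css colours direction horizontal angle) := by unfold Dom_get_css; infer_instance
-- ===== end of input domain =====

-- B groups the colours into runs of consecutive equal values and emits both gradient stops
-- of each run at once (objective: alternative decomposition, no inner neighbour lookups);
-- same return value as A on every non-empty colour list.

-- ===== PORT A =====
-- Shared exact model of the Python float expression `ceil(percentage * i)` where
-- `percentage = 100 / n`: both Pythons evaluate exactly this IEEE-binary64 expression,
-- so both ports use this one helper. It rounds each operation to the nearest double
-- (ties to even), which is exact for the positive, non-overflowing values reached here.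
def pvIlog2 (q : ℚ) : ℤ :=
  let g : ℤ := (Nat.log2 q.num.toNat : ℤ) - (Nat.log2 q.den : ℤ)
  if (2:ℚ) ^ g ≤ q then g else g - 1

def pvFl (q : ℚ) : ℚ :=
  let e := pvIlog2 q
  let scale : ℚ := (2:ℚ) ^ ((52:ℤ) - e)
  let x := q * scale
  let f : ℤ := ⌊x⌋
  let r := x - (f : ℚ)
  let m : ℤ := if r > 1/2 then f + 1 else if r < 1/2 then f else if f % 2 = 0 then f else f + 1
  (m : ℚ) / scale

def pvCeilPct (n : Nat) (i : Int) : Int := ⌈pvFl (pvFl (100 / (n : ℚ)) * (i : ℚ))⌉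

-- the body of A's `for i, colour in enumerate(colours):` loop
def pvStepA (colours : List String) (bg : String) (p : Int × String) : String :=
  let bg := if p.1 ≠ 0 ∧ (PySem.List.pyGet? colours (p.1 - 1)).getD "" ≠ p.2
            then bg ++ "," ++ p.2 ++ " " ++ PySem.Int.toStr (pvCeilPct colours.length p.1) ++ "%" else bg
  if p.1 ≠ (colours.length : Int) - 1 ∧ (PySem.List.pyGet? colours (p.1 + 1)).getD "" ≠ p.2
  then bg ++ "," ++ p.2 ++ " " ++ PySem.Int.toStr (pvCeilPct colours.length (p.1 + 1)) ++ "%" else bg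

def get_css (colours : List String) (direction : Option Int) (horizontal : Bool) (angle : Option Int) : String :=
  if colours.length == 1 then (PySem.List.pyGet? colours 0).getD ""
  else
    let d : Int := match direction with | none => 180 | some v => v
    let background := "linear-gradient("
    let background := background ++
      (if horizontal then "to top"
       else if d < 180 then
         match angle with
         | some a => if a ≠ 0 then PySem.Int.toStr (360 - a) ++ "deg" else "to left"
         | none => "to left"
       else
         match angle with
         | some a => if a ≠ 0 then PySem.Int.toStr a ++ "deg" else "to right"
         | none => "to right")
    let background := (PySem.List.enumerate colours 0).foldl (pvStepA colours) background
    background ++ ")"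

-- ===== PORT B =====
-- itertools.groupby: the runs of consecutive equal colours, as (colour, run length)
def pvRunsGo (c : String) (k : Nat) : List String → List (String × Nat)
  | [] => [(c, k)]
  | x :: t => if x = c then pvRunsGo c (k + 1) t else (c, k) :: pvRunsGo x 1 t

def pvRuns : List String → List (String × Nat)
  | [] => []
  | c :: t => pvRunsGo c 1 t

-- the body of B's `for colour, grp in groupby(colours):` loop (state: pos, parts)
def pvStepB (m : Nat) (st : Nat × List String) (r : String × Nat) : Nat × List String :=
  let s := st.1
  let e := st.1 + r.2 - 1
  let parts := if s ≠ 0 then st.2 ++ ["," ++ r.1 ++ " " ++ PySem.Int.toStr (pvCeilPct m (s : Int)) ++ "%"] else st.2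
  let parts := if e ≠ m - 1 then parts ++ ["," ++ r.1 ++ " " ++ PySem.Int.toStr (pvCeilPct m ((e + 1 : Nat) : Int)) ++ "%"] else parts
  (st.1 + r.2, parts)

def get_css_alt (colours : List String) (direction : Option Int) (horizontal : Bool) (angle : Option Int) : String :=
  if colours.length == 1 then (PySem.List.pyGet? colours 0).getD ""
  else
    let d : Int := match direction with | none => 180 | some v => v
    let pre : String :=
      if horizontal then "to top"
      else if d < 180 then
        match angle with
        | some a => if a ≠ 0 then PySem.Int.toStr (360 - a) ++ "deg" else "to left"
        | none => "to left"
      else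
        match angle with
        | some a => if a ≠ 0 then PySem.Int.toStr a ++ "deg" else "to right"
        | none => "to right"
    let n := colours.length
    let st := (pvRuns colours).foldl (pvStepB n) (0, ["linear-gradient(", pre])
    PySem.Str.join "" (st.2 ++ [")"])

-- ===== PRECONDITION & SPEC =====
-- Pre_ excludes only the empty colour list, on which A raises ZeroDivisionError
-- (percentage = 100 / len(colours)); B raises there too.
def Pre_get_css (colours : List String) (direction : Option Int) (horizontal : Bool) (angle : Option Int) : Prop := colours ≠ []
instance (colours : List String) (direction : Option Int) (horizontal : Bool) (angle : Option Int) : Decidable (Pre_get_css colours direction horizontal angle) := by unfold Pre_get_css; infer_instance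

def pvWitness_get_css : List String × Option Int × Bool × Option Int := (["red", "red", "blue"], none, false, none)

def Spec_get_css (colours : List String) (direction : Option Int) (horizontal : Bool) (angle : Option Int) (out : String) : Prop := out = get_css_alt colours direction horizontal angle
instance (colours : List String) (direction : Option Int) (horizontal : Bool) (angle : Option Int) (out : String) : Decidable (Spec_get_css colours direction horizontal angle out) := by unfold Spec_get_css; infer_instance

-- ===== CLAIM (what is proved, stated in full; the proofs are below) =====
def Claim_equal_get_css : Prop := ∀ (colours : List String) (direction : Option Int) (horizontal : Bool) (angle : Option Int), Dom_get_css colours direction horizontal angle → Pre_get_css colours direction horizontal angle → Spec_get_css colours direction horizontal angle (get_css colours direction horizontal angle)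

-- ===== LEMMAS AND PROOFS =====

-- one gradient stop string
def pvStop (m : Nat) (c : String) (j : Int) : String :=
  "," ++ c ++ " " ++ PySem.Int.toStr (pvCeilPct m j) ++ "%"

def pvConcat : List String → String
  | [] => ""
  | s :: l => s ++ pvConcat l

-- what A's loop body appends for one enumerated element
def pvGA (colours : List String) (p : Int × String) : String :=
  (if p.1 ≠ 0 ∧ (PySem.List.pyGet? colours (p.1 - 1)).getD "" ≠ p.2 then pvStop colours.length p.2 p.1 else "")
  ++ (if p.1 ≠ (colours.length : Int) - 1 ∧ (PySem.List.pyGet? colours (p.1 + 1)).getD "" ≠ p.2 then pvStop colours.length p.2 (p.1 + 1) else "")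

-- what B's loop body appends for one run
def pvEmit (m : Nat) : List (String × Nat) → Nat → List String
  | [], _ => []
  | r :: rs, pos =>
    (if pos ≠ 0 then ["," ++ r.1 ++ " " ++ PySem.Int.toStr (pvCeilPct m (pos : Int)) ++ "%"] else [])
    ++ (if pos + r.2 - 1 ≠ m - 1 then ["," ++ r.1 ++ " " ++ PySem.Int.toStr (pvCeilPct m ((pos + r.2 - 1 + 1 : Nat) : Int)) ++ "%"] else [])
    ++ pvEmit m rs (pos + r.2)

lemma pvConcat_toList (l : List String) : (pvConcat l).toList = (l.map String.toList).flatten := by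
  induction l with
  | nil => rfl
  | cons s t ih => simp [pvConcat, String.toList_append, ih]

lemma pvCharsJoinNil (ps : List (List Char)) : PySem.Chars.join [] ps = ps.flatten := by
  induction ps with
  | nil => simp [PySem.Chars.join_nil]
  | cons p rest ih =>
    cases rest with
    | nil => simp [PySem.Chars.join_singleton]
    | cons q r => simp [PySem.Chars.join_cons_cons, ih]

lemma pvJoinEmpty (l : List String) : PySem.Str.join "" l = pvConcat l := by
  apply String.toList_inj.mp
  rw [pvConcat_toList]
  simp [pvCharsJoinNil]

lemma pvFoldlStr {α : Type} (f : String → α → String) (g : α → String)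
    (h : ∀ a x, f a x = a ++ g x) :
    ∀ (l : List α) (acc : String), l.foldl f acc = acc ++ pvConcat (l.map g) := by
  intro l
  induction l with
  | nil => intro acc; simp [pvConcat]
  | cons x t ih => intro acc; simp [List.foldl, h, ih, pvConcat, String.append_assoc]

lemma pvStepA_eq (colours : List String) (bg : String) (p : Int × String) :
    pvStepA colours bg p = bg ++ pvGA colours p := by
  unfold pvStepA pvGA pvStop
  split_ifs <;> simp [String.append_assoc] <;> rfl

lemma pvFoldB (m : Nat) : ∀ (rs : List (String × Nat)) (pos : Nat) (parts : List String),
    rs.foldl (pvStepB m) (pos, parts) =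
      (pos + (rs.map (·.2)).sum, parts ++ pvEmit m rs pos) := by
  intro rs
  induction rs with
  | nil => intro pos parts; simp [pvEmit]
  | cons r t ih =>
    intro pos parts
    simp only [List.foldl, pvStepB, List.map_cons, List.sum_cons]
    rw [ih]
    simp only [Prod.mk.injEq]
    refine ⟨by omega, ?_⟩
    show _ = parts ++ pvEmit m (r :: t) pos
    conv_rhs => rw [pvEmit]
    split_ifs <;> simp

lemma pvConcat_append (a b : List String) : pvConcat (a ++ b) = pvConcat a ++ pvConcat b := by
  induction a with
  | nil => simp [pvConcat]
  | cons s t ih => simp [pvConcat, ih, String.append_assoc]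

lemma pvGA_eval (colours : List String) (i : Nat) (c prevc : String) (t' : List String)
    (hi : 1 ≤ i)
    (hprev : colours[i-1]? = some prevc)
    (hd : colours.drop (i+1) = t')
    (hn : colours.length = i + 1 + t'.length) :
    pvGA colours ((i : Int), c) =
      (if prevc ≠ c then pvStop colours.length c (i : Int) else "")
      ++ (match t'.head? with
          | none => ""
          | some z => if z ≠ c then pvStop colours.length c ((i + 1 : Nat) : Int) else "") := by
  have hcast : ((i : Int) - 1) = ((i - 1 : Nat) : Int) := by omega
  have hget : PySem.List.pyGet? colours ((i : Int) - 1) = some prevc := by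
    rw [hcast, PySem.List.pyGet?_natCast]; exact hprev
  have hi0 : ¬((i : Int) = 0) := by omega
  unfold pvGA
  cases t' with
  | nil =>
    have hlen : colours.length = i + 1 := by simpa using hn
    have h0 : ¬((i : Int) ≠ (colours.length : Int) - 1 ∧ (PySem.List.pyGet? colours ((i:Int) + 1)).getD "" ≠ c) := by
      rw [hlen]; push_cast; omega
    have hi' : ¬(i = 0) := by omega
    simp [hget, hi', h0, ite_not]
  | cons z r =>
    have hlen : colours.length = i + r.length + 2 := by simp at hn; omega
    have hne : ¬((i : Int) = (colours.length : Int) - 1) := by rw [hlen]; push_cast; omega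
    have hget2 : PySem.List.pyGet? colours ((i : Int) + 1) = some z := by
      have hc2 : ((i : Int) + 1) = ((i + 1 : Nat) : Int) := by omega
      rw [hc2, PySem.List.pyGet?_natCast]
      have h : (List.drop (i + 1) colours)[0]? = colours[i + 1 + 0]? := List.getElem?_drop ..
      rw [hd] at h; simpa using h.symm
    have hi' : ¬(i = 0) := by omega
    simp [hget, hget2, hi', hne, ite_not]

lemma pvCore (colours : List String) :
    ∀ (t : List String) (c : String) (k pos : Nat),
      1 ≤ k →
      colours.length = pos + k + t.length →
      colours.drop (pos + k) = t →
      (∀ j : Nat, pos ≤ j → j < pos + k → colours[j]? = some c) →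
      pvConcat (pvEmit colours.length (pvRunsGo c k t) pos)
      = (if pos ≠ 0 then pvStop colours.length c (pos : Int) else "")
        ++ (match t.head? with
            | none => ""
            | some y => if y ≠ c then pvStop colours.length c ((pos + k : Nat) : Int) else "")
        ++ pvConcat ((PySem.List.enumerate t ((pos + k : Nat) : Int)).map (pvGA colours)) := by
  intro t
  induction t with
  | nil =>
    intro c k pos hk hn _ _
    have hn' : colours.length = pos + k := by simpa using hn
    have h2 : pos + k - 1 = colours.length - 1 := by omega
    simp only [pvRunsGo, pvEmit, h2, ne_eq, not_true_eq_false, if_false]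
    split_ifs <;> simp [pvConcat, pvStop, PySem.List.enumerate_nil, String.append_assoc]
  | cons x t' ih =>
    intro c k pos hk hn hd hrun
    have hn' : colours.length = pos + k + 1 + t'.length := by simp at hn; omega
    have hme : colours[pos + k - 1]? = some c := hrun (pos + k - 1) (by omega) (by omega)
    have hx0 : colours[pos + k]? = some x := by
      have h : (List.drop (pos + k) colours)[0]? = colours[pos + k + 0]? := List.getElem?_drop ..
      rw [hd] at h; simpa using h.symm
    have hd' : colours.drop (pos + k + 1) = t' := by
      have h := congrArg (List.drop 1) hd
      rw [List.drop_drop] at h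
      simpa [Nat.add_comm] using h
    rw [pvRunsGo]
    by_cases hxc : x = c
    · subst hxc
      rw [if_pos rfl]
      rw [ih x (k + 1) pos (by omega) (by omega) (by simpa [Nat.add_assoc] using hd')
          (by
            intro j hj1 hj2
            by_cases hj : j < pos + k
            · exact hrun j hj1 hj
            · have : j = pos + k := by omega
              rw [this]; exact hx0)]
      rw [PySem.List.enumerate_cons, List.map_cons]
      show _ = _ ++ _ ++ pvConcat (pvGA colours ((↑(pos + k) : Int), x) :: _)
      rw [show pvConcat (pvGA colours ((↑(pos + k) : Int), x) :: (PySem.List.enumerate t' ((↑(pos+k) : Int) + 1)).map (pvGA colours)) = pvGA colours ((↑(pos + k) : Int), x) ++ pvConcat ((PySem.List.enumerate t' ((↑(pos+k) : Int) + 1)).map (pvGA colours)) from rfl]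
      rw [pvGA_eval colours (pos + k) x x t' (by omega) hme hd' (by omega)]
      have hc3 : ((pos + k : Nat) : Int) + 1 = ((pos + (k + 1) : Nat) : Int) := by push_cast; ring
      simp only [hc3, ne_eq, not_true_eq_false, if_false]
      cases t'.head? <;> simp [String.append_assoc, add_assoc]
    · rw [if_neg hxc]
      conv_lhs => rw [pvEmit]
      simp only []
      rw [pvConcat_append, pvConcat_append]
      rw [ih x 1 (pos + k) (by omega) (by omega) (by simpa using hd')
          (by
            intro j hj1 hj2
            have : j = pos + k := by omega
            rw [this]; exact hx0)]
      rw [PySem.List.enumerate_cons, List.map_cons]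
      show _ = _ ++ _ ++ pvConcat (pvGA colours ((↑(pos + k) : Int), x) :: _)
      rw [show pvConcat (pvGA colours ((↑(pos + k) : Int), x) :: (PySem.List.enumerate t' ((↑(pos+k) : Int) + 1)).map (pvGA colours)) = pvGA colours ((↑(pos + k) : Int), x) ++ pvConcat ((PySem.List.enumerate t' ((↑(pos+k) : Int) + 1)).map (pvGA colours)) from rfl]
      rw [pvGA_eval colours (pos + k) x c t' (by omega) hme hd' (by omega)]
      have hend : pos + k - 1 ≠ colours.length - 1 := by omega
      have hstep : pos + k - 1 + 1 = pos + k := by omega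
      have hpk0 : ¬(pos + k = 0) := by omega
      have hcx : ¬(c = x) := fun h => hxc h.symm
      have hc3 : ((pos + k : Nat) : Int) + 1 = ((pos + k + 1 : Nat) : Int) := by push_cast; ring
      simp only [hend, hstep, hpk0, hc3, ne_eq, not_false_eq_true, if_pos]
      cases t'.head? <;> split_ifs <;> simp [pvConcat, pvStop, String.append_assoc, hxc]

lemma pvBody (colours : List String) (h : colours ≠ []) :
    pvConcat (pvEmit colours.length (pvRuns colours) 0)
    = pvConcat ((PySem.List.enumerate colours 0).map (pvGA colours)) := by
  cases colours with
  | nil => exact absurd rfl h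
  | cons c t =>
    rw [pvRuns]
    rw [pvCore (c :: t) t c 1 0 (by omega) (by simp [List.length_cons]; omega) (by simp)
        (by intro j hj1 hj2; have hj : j = 0 := (by omega); subst hj; rfl)]
    rw [PySem.List.enumerate_cons, List.map_cons]
    show _ = pvGA (c :: t) ((0 : Int), c) ++ _
    have hga : pvGA (c :: t) ((0 : Int), c) =
        (match t.head? with
         | none => ""
         | some y => if y ≠ c then pvStop (c :: t).length c ((0 + 1 : Nat) : Int) else "") := by
      unfold pvGA
      cases t with
      | nil => simp
      | cons z r =>
        have h1 : PySem.List.pyGet? (c :: z :: r) ((0 : Int) + 1) = some z := by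
          have : ((0 : Int) + 1) = ((1 : Nat) : Int) := by omega
          rw [this, PySem.List.pyGet?_natCast]; rfl
        have h2 : ¬((0 : Int) = ((c :: z :: r).length : Int) - 1) := by simp; omega
        have h3 : ¬((0 : Int) = (r.length : Int) + 1) := by omega
        simp [h3, ite_not]
    rw [hga]
    cases t.head? <;> simp


-- ===== VERDICT (by name: the statement is the Claim_ definition above) =====
theorem get_css_spec : Claim_equal_get_css := by
  intro colours direction horizontal angle _ hpre
  unfold Pre_get_css at hpre
  unfold Spec_get_css
  by_cases h1 : (colours.length == 1) = true
  · simp only [get_css, get_css_alt, h1, if_true]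
  · simp only [get_css, get_css_alt, h1, Bool.false_eq_true, if_false]
    rw [pvFoldlStr (pvStepA colours) (pvGA colours) (pvStepA_eq colours)]
    rw [pvFoldB colours.length]
    simp only []
    rw [pvJoinEmpty, pvConcat_append, ← pvBody colours hpre]
    rw [pvConcat_append]
    simp [pvConcat, String.append_assoc]
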